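-- pv_equiv track=rewrite | github.com/cyberman/micropython-amiga-port | ports/amiga/samples/diff_view.py | expand_tabs
-- ===== SOURCE A (Python) =====
-- def expand_tabs(s, tabsize=4):
--     """Manual tab expansion (str.expandtabs is not in MicroPython)."""
--     if "\t" not in s:
--         return s
--     out = []
--     col = 0
--     for ch in s:
--         if ch == "\t":
--             spaces = tabsize - (col % tabsize)
--             out.append(" " * spaces)
--             col += spaces
--         else:
--             out.append(ch)
--             col += 1
--     return "".join(out)
-- ===== SOURCE B (Python) =====
-- def expand_tabs(s, tabsize=4):
--     """Manual tab expansion (str.expandtabs is not in MicroPython)."""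
--     if "\t" not in s:
--         return s
--     parts = s.split("\t")
--     out = parts[0]
--     col = len(parts[0])
--     for seg in parts[1:]:
--         spaces = tabsize - (col % tabsize)
--         out += " " * spaces + seg
--         col += spaces + len(seg)
--     return out
-- ===== Notes on version B (the rewrite author's own statement) =====
-- stated objective: alternative
-- what changed: B splits the string at tabs once and processes whole tab-free segments (bulk string concatenation per segment) instead of A's per-character loop that appends each character to a list and joins.
import Mathlib
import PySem

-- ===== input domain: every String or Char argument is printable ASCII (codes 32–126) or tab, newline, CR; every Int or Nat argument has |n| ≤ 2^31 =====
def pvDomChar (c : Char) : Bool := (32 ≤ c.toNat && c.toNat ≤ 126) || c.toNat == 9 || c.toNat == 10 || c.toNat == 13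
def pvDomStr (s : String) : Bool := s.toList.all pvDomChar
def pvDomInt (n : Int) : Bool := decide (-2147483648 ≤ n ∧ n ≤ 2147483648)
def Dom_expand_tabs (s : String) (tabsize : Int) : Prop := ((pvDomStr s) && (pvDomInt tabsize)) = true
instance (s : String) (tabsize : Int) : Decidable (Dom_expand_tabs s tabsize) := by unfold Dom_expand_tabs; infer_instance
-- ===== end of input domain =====

-- B expands tabs by splitting on "\t" once and handling whole tab-free segments,
-- instead of A's per-character loop; return values proved equal on Pre_.

-- ===== PORT A =====
-- one iteration of A's 'for ch in s' loop; state = (out as list of the appended strings, col)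
def pvAStep (tabsize : Int) (st : List (List Char) × Int) (ch : Char) : List (List Char) × Int :=
  if ch == '\t' then
    let spaces := tabsize - PySem.Int.mod st.2 tabsize
    -- " " * spaces : empty when spaces ≤ 0, exactly List.replicate spaces.toNat ' '
    (st.1 ++ [List.replicate spaces.toNat ' '], st.2 + spaces)
  else
    (st.1 ++ [[ch]], st.2 + 1)

def expand_tabs (s : String) (tabsize : Int) : String :=
  if PySem.Str.isIn "\t" s = false then s
  else
    let r := s.toList.foldl (pvAStep tabsize) ([], 0)
    String.ofList (PySem.Chars.join [] r.1)

-- ===== PORT B =====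
-- one iteration of B's 'for seg in parts[1:]' loop; state = (out as chars, col)
def pvBStep (tabsize : Int) (st : List Char × Int) (seg : List Char) : List Char × Int :=
  let spaces := tabsize - PySem.Int.mod st.2 tabsize
  (st.1 ++ List.replicate spaces.toNat ' ' ++ seg, st.2 + spaces + (seg.length : Int))

def expand_tabs_alt (s : String) (tabsize : Int) : String :=
  if PySem.Str.isIn "\t" s = false then s
  else
    match PySem.Chars.splitOn s.toList ['\t'] with
    | [] => s  -- unreachable: split never returns an empty list
    | h :: t => String.ofList (t.foldl (pvBStep tabsize) (h, (h.length : Int))).1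

-- ===== PRECONDITION & SPEC =====
-- Pre_ excludes only tabsize = 0 on strings that contain a tab: there Python A (and B)
-- raises ZeroDivisionError at the tab-stop modulo.
def Pre_expand_tabs (s : String) (tabsize : Int) : Prop :=
  PySem.Str.isIn "\t" s = true → tabsize ≠ 0
instance (s : String) (tabsize : Int) : Decidable (Pre_expand_tabs s tabsize) := by
  unfold Pre_expand_tabs; infer_instance

def pvWitness_expand_tabs : String × Int := ("a\tbc\td", 4)

def Spec_expand_tabs (s : String) (tabsize : Int) (out : String) : Prop := out = expand_tabs_alt s tabsize
instance (s : String) (tabsize : Int) (out : String) : Decidable (Spec_expand_tabs s tabsize out) := by unfold Spec_expand_tabs; infer_instance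

-- ===== CLAIM (what is proved, stated in full; the proofs are below) =====
def Claim_equal_expand_tabs : Prop := ∀ (s : String) (tabsize : Int), Dom_expand_tabs s tabsize → Pre_expand_tabs s tabsize → Spec_expand_tabs s tabsize (expand_tabs s tabsize)

-- ===== LEMMAS AND PROOFS =====

-- PySem's fuel-based splitOn on a one-character separator is Mathlib's splitOnP
lemma pv_go_eq (c : Char) : ∀ (fuel : Nat) (l cur : List Char) (acc : List (List Char)), l.length < fuel →
    PySem.Chars.splitOn.go [c] fuel l cur acc
      = acc.reverse ++ List.modifyHead (cur.reverse ++ ·) (List.splitOnP (· == c) l) := by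
  intro fuel
  induction fuel with
  | zero => intro l cur acc h; omega
  | succ n ih =>
    intro l cur acc h
    cases l with
    | nil =>
        rw [PySem.Chars.splitOn.go.eq_def]
        simp [List.splitOnP_nil]
    | cons a rest =>
      rw [PySem.Chars.splitOn.go.eq_def]
      simp only [List.splitOnP_cons]
      by_cases hc : a = c
      · subst hc
        simp only [List.isPrefixOf, BEq.rfl, Bool.true_and, if_pos]
        rw [ih _ _ _ (by simpa using Nat.lt_of_succ_lt_succ h)]
        cases hS : List.splitOnP (· == a) rest with
        | nil => exact absurd hS (List.splitOnP_ne_nil _ _)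
        | cons b bs => simp [hS]
      · have hpre : List.isPrefixOf [c] (a :: rest) = false := by
          simp [List.isPrefixOf]
          exact fun h' => absurd h'.symm hc
        rw [hpre]
        simp only [Bool.false_eq_true, if_false]
        rw [ih _ _ _ (by simpa using Nat.lt_of_succ_lt_succ h)]
        have : (a == c) = false := by simp [hc]
        rw [this]
        simp only [Bool.false_eq_true, if_false]
        cases hS : List.splitOnP (· == c) rest with
        | nil => exact absurd hS (List.splitOnP_ne_nil _ _)
        | cons b bs => simp

lemma pv_splitOn_eq (c : Char) (cs : List Char) :
    PySem.Chars.splitOn cs [c] = List.splitOnP (· == c) cs := by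
  unfold PySem.Chars.splitOn
  rw [pv_go_eq c (cs.length + 1) cs [] [] (by omega)]
  cases hS : List.splitOnP (· == c) cs with
  | nil => exact absurd hS (List.splitOnP_ne_nil _ _)
  | cons b bs => simp

-- structure of the split: the original list is head ++ ⋃ ('\t' :: seg), and every part is tab-free
lemma pv_split_struct (c : Char) : ∀ (cs : List Char) (h : List Char) (t : List (List Char)),
    List.splitOnP (· == c) cs = h :: t →
    cs = h ++ (t.map (fun g => c :: g)).flatten
      ∧ (∀ x ∈ h, x ≠ c) ∧ (∀ g ∈ t, ∀ x ∈ g, x ≠ c) := by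
  intro cs
  induction cs with
  | nil =>
    intro h t hS
    rw [List.splitOnP_nil] at hS
    cases hS; simp
  | cons a rest ih =>
    intro h t hS
    rw [List.splitOnP_cons] at hS
    by_cases hc : a = c
    · subst hc
      rw [if_pos (by simp)] at hS
      cases hS' : List.splitOnP (· == a) rest with
      | nil => exact absurd hS' (List.splitOnP_ne_nil _ _)
      | cons b bs =>
        rw [hS'] at hS
        cases hS
        obtain ⟨h1, h2, h3⟩ := ih b bs hS'
        refine ⟨by simp [h1], by simp, ?_⟩
        intro g hg
        rcases List.mem_cons.mp hg with rfl | hg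
        · exact h2
        · exact h3 g hg
    · rw [if_neg (by simp [hc])] at hS
      cases hS' : List.splitOnP (· == c) rest with
      | nil => exact absurd hS' (List.splitOnP_ne_nil _ _)
      | cons b bs =>
        rw [hS'] at hS
        simp only [List.modifyHead] at hS
        injection hS with e1 e2
        subst e1; subst e2
        obtain ⟨h1, h2, h3⟩ := ih b bs hS'
        refine ⟨by simp [h1], ?_, h3⟩
        intro x hx
        rcases List.mem_cons.mp hx with rfl | hx
        · exact hc
        · exact h2 x hx

-- '' .join / flatten bookkeeping
lemma pv_join_nil_eq_flatten : ∀ (l : List (List Char)), PySem.Chars.join [] l = l.flatten := by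
  intro l
  induction l with
  | nil => simp [PySem.Chars.join, List.intercalate]
  | cons a t ih =>
    cases t with
    | nil => simp [PySem.Chars.join, List.intercalate]
    | cons b u =>
      simp only [PySem.Chars.join, List.intercalate, List.intersperse] at ih ⊢
      simp at ih ⊢
      exact ih

lemma pv_flatten_singletons (g : List Char) : (g.map (fun ch => [ch])).flatten = g := by
  rw [← pv_join_nil_eq_flatten]
  exact PySem.Chars.join_nil_singletons g

-- A's loop over a tab-free run appends the characters one by one
lemma pv_aFold_no_tab (tab : Int) : ∀ (seg : List Char), (∀ x ∈ seg, x ≠ '\t') →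
    ∀ (out : List (List Char)) (col : Int),
    seg.foldl (pvAStep tab) (out, col) = (out ++ seg.map (fun ch => [ch]), col + (seg.length : Int)) := by
  intro seg
  induction seg with
  | nil => intro _ out col; simp
  | cons a rest ih =>
    intro hfree out col
    have ha : (a == '\t') = false := by simp [hfree a (by simp)]
    simp only [List.foldl_cons, pvAStep, ha, Bool.false_eq_true, if_false]
    rw [ih (fun x hx => hfree x (by simp [hx])) (out ++ [[a]]) (col + 1)]
    simp
    omega

-- the heart: A's per-character loop over the '\t'-joined tail equals B's per-segment loop
lemma pv_main (tab : Int) : ∀ (t : List (List Char)), (∀ g ∈ t, ∀ x ∈ g, x ≠ '\t') →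
    ∀ (out : List (List Char)) (col : Int),
    ((((t.map (fun g => '\t' :: g)).flatten).foldl (pvAStep tab) (out, col)).1.flatten
        = (t.foldl (pvBStep tab) (out.flatten, col)).1)
      ∧ ((((t.map (fun g => '\t' :: g)).flatten).foldl (pvAStep tab) (out, col)).2
        = (t.foldl (pvBStep tab) (out.flatten, col)).2) := by
  intro t
  induction t with
  | nil => intro _ out col; simp
  | cons g rest ih =>
    intro hfree out col
    simp only [List.map_cons, List.flatten_cons, List.foldl_cons]
    rw [List.cons_append, List.foldl_cons]
    have hg : ∀ x ∈ g, x ≠ '\t' := hfree g (by simp)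
    simp only [pvAStep, pvBStep, BEq.rfl, if_pos]
    rw [List.foldl_append]
    rw [pv_aFold_no_tab tab g hg _ _]
    have H := ih (fun g' hg' => hfree g' (by simp [hg']))
      (out ++ [List.replicate (tab - PySem.Int.mod col tab).toNat ' '] ++ g.map (fun ch => [ch]))
      (col + (tab - PySem.Int.mod col tab) + (g.length : Int))
    simp only [List.flatten_append, List.flatten_cons, List.flatten_nil, List.append_nil,
      pv_flatten_singletons, List.append_assoc] at H ⊢
    exact H

-- ===== VERDICT (by name: the statement is the Claim_ definition above) =====
theorem expand_tabs_spec : Claim_equal_expand_tabs := by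
  intro s tabsize _ _
  unfold Spec_expand_tabs expand_tabs expand_tabs_alt
  simp only [PySem.Str.isIn_eq]
  by_cases hin : PySem.Chars.isIn "\t".toList s.toList = false
  · rw [if_pos hin, if_pos hin]
  · rw [if_neg hin, if_neg hin]
    rw [pv_splitOn_eq '\t' s.toList]
    cases hS : List.splitOnP (· == '\t') s.toList with
    | nil => exact absurd hS (List.splitOnP_ne_nil _ _)
    | cons h t =>
      obtain ⟨h1, h2, h3⟩ := pv_split_struct '\t' s.toList h t hS
      conv_lhs => rw [h1]
      rw [List.foldl_append, pv_aFold_no_tab tabsize h h2 [] 0]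
      have H := pv_main tabsize t h3 (h.map (fun ch => [ch])) (0 + (h.length : Int))
      simp only [pv_flatten_singletons, List.nil_append, zero_add] at H ⊢
      rw [pv_join_nil_eq_flatten, H.1]
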